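-- pv_equiv track=rewrite | github.com/gk-dev-thestratford/stratford-laundry-dashboard | migration/migrate_batch2.py | get_order_type
-- ===== SOURCE A (Python) =====
-- CATALOGUE = {
--     'SHIRT':              {'code': 'UNI-001', 'name': 'Shirt',              'price': 1.10, 'cat': 'uniform'},
--     'BLOUSE':             {'code': 'UNI-002', 'name': 'Blouse',             'price': 2.20, 'cat': 'uniform'},
--     'TROUSER':            {'code': 'UNI-003', 'name': 'Trouser/Jeans',      'price': 2.75, 'cat': 'uniform'},
--     'DRESS':              {'code': 'UNI-004', 'name': 'Dress',              'price': 5.50, 'cat': 'uniform'},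
--     'BLAZER (TOP)':       {'code': 'UNI-005', 'name': 'Jacket/Blazer',      'price': 2.75, 'cat': 'uniform'},
--     'APRON':              {'code': 'UNI-006', 'name': 'Apron',              'price': 0.99, 'cat': 'uniform'},
--     'CHEF JACKET':        {'code': 'UNI-009', 'name': 'Chef Jacket',        'price': 1.34, 'cat': 'uniform'},
--     'CHEF TROUSER':       {'code': 'UNI-010', 'name': 'Chef Trouser',       'price': 1.48, 'cat': 'uniform'},
--     '2 PCS - SUITS':      {'code': 'UNI-011', 'name': '2 Piece Suit',       'price': 5.50, 'cat': 'uniform'},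
--     'JUMPER/HOODIE':      {'code': 'UNI-012', 'name': 'Hoody/Jumper',       'price': 3.00, 'cat': 'uniform'},
--     'POLO T-SHIRT':       {'code': 'UNI-015', 'name': 'T-Shirt/Polo Shirt', 'price': 1.74, 'cat': 'uniform'},
--     'TABLE CLOTH':        {'code': 'FNB-002', 'name': 'Table Cloth',        'price': 3.25, 'cat': 'fnb_linen'},
--     'TABLE LINENS NAPKINS': {'code': 'FNB-003', 'name': 'Linen Napkins',    'price': 0.22, 'cat': 'fnb_linen'},
--     'BATH ROBES':         {'code': 'HSK-004', 'name': 'Bathrobes',          'price': 2.99, 'cat': 'hsk_linen'},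
--     'GUEST-OTHER':        {'code': None, 'name': 'Guest Laundry',           'price': None, 'cat': 'guest_laundry'},
--     'HOUSEKEEPING':       {'code': None, 'name': 'Housekeeping',            'price': None, 'cat': 'hsk_linen'},
-- }
--
-- def get_order_type(items, dept):
--     d = dept.strip().upper()
--     if d in ('HOTEL -GUEST', 'LOFT -RESIDENT'):
--         return 'guest_laundry'
--     cats = set()
--     for name, _ in items:
--         c = CATALOGUE.get(name)
--         if c:
--             cats.add(c['cat'])
--     if 'hsk_linen' in cats:
--         return 'hsk_linen'
--     if 'fnb_linen' in cats:
--         return 'fnb_linen'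
--     if 'guest_laundry' in cats:
--         return 'guest_laundry'
--     return 'uniform'
-- ===== SOURCE B (Python) =====
-- CATALOGUE = {
--     'SHIRT':              {'code': 'UNI-001', 'name': 'Shirt',              'price': 1.10, 'cat': 'uniform'},
--     'BLOUSE':             {'code': 'UNI-002', 'name': 'Blouse',             'price': 2.20, 'cat': 'uniform'},
--     'TROUSER':            {'code': 'UNI-003', 'name': 'Trouser/Jeans',      'price': 2.75, 'cat': 'uniform'},
--     'DRESS':              {'code': 'UNI-004', 'name': 'Dress',              'price': 5.50, 'cat': 'uniform'},
--     'BLAZER (TOP)':       {'code': 'UNI-005', 'name': 'Jacket/Blazer',      'price': 2.75, 'cat': 'uniform'},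
--     'APRON':              {'code': 'UNI-006', 'name': 'Apron',              'price': 0.99, 'cat': 'uniform'},
--     'CHEF JACKET':        {'code': 'UNI-009', 'name': 'Chef Jacket',        'price': 1.34, 'cat': 'uniform'},
--     'CHEF TROUSER':       {'code': 'UNI-010', 'name': 'Chef Trouser',       'price': 1.48, 'cat': 'uniform'},
--     '2 PCS - SUITS':      {'code': 'UNI-011', 'name': '2 Piece Suit',       'price': 5.50, 'cat': 'uniform'},
--     'JUMPER/HOODIE':      {'code': 'UNI-012', 'name': 'Hoody/Jumper',       'price': 3.00, 'cat': 'uniform'},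
--     'POLO T-SHIRT':       {'code': 'UNI-015', 'name': 'T-Shirt/Polo Shirt', 'price': 1.74, 'cat': 'uniform'},
--     'TABLE CLOTH':        {'code': 'FNB-002', 'name': 'Table Cloth',        'price': 3.25, 'cat': 'fnb_linen'},
--     'TABLE LINENS NAPKINS': {'code': 'FNB-003', 'name': 'Linen Napkins',    'price': 0.22, 'cat': 'fnb_linen'},
--     'BATH ROBES':         {'code': 'HSK-004', 'name': 'Bathrobes',          'price': 2.99, 'cat': 'hsk_linen'},
--     'GUEST-OTHER':        {'code': None, 'name': 'Guest Laundry',           'price': None, 'cat': 'guest_laundry'},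
--     'HOUSEKEEPING':       {'code': None, 'name': 'Housekeeping',            'price': None, 'cat': 'hsk_linen'},
-- }
--
-- def get_order_type(items, dept):
--     d = dept.strip().upper()
--     if d in ('HOTEL -GUEST', 'LOFT -RESIDENT'):
--         return 'guest_laundry'
--     items = list(items)
--     for cat in ('hsk_linen', 'fnb_linen', 'guest_laundry'):
--         if any(name in CATALOGUE and CATALOGUE[name]['cat'] == cat for name, _ in items):
--             return cat
--     return 'uniform'
-- ===== Notes on version B (the rewrite author's own statement) =====
-- stated objective: simpler
-- what changed: Replaced A's build-a-set-of-categories pass followed by three membership tests with a single priority-ordered loop that re-scans the items with any() per category and returns the first hit.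
import Mathlib
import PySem

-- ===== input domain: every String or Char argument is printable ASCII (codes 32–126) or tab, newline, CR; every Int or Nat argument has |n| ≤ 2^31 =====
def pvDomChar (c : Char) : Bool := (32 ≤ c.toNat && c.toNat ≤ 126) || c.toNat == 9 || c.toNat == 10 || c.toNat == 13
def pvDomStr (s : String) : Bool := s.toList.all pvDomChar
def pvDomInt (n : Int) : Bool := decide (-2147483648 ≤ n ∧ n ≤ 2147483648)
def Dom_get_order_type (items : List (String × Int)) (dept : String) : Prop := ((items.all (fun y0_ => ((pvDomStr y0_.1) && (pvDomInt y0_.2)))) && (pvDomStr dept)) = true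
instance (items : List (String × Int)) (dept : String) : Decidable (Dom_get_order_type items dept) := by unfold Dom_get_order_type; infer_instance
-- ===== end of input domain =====

-- B replaces A's collect-categories-into-a-set pass by a priority-ordered loop that
-- rescans the items per category with any(); objective: simpler.

-- ===== PORT A =====
-- CATALOGUE restricted to the 'cat' field (the only field either program reads);
-- an association list in the dict's insertion order, looked up by first match (exact: keys are distinct).
def pvCatalogueCat : List (String × String) :=
  [("SHIRT", "uniform"), ("BLOUSE", "uniform"), ("TROUSER", "uniform"), ("DRESS", "uniform"),
   ("BLAZER (TOP)", "uniform"), ("APRON", "uniform"), ("CHEF JACKET", "uniform"),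
   ("CHEF TROUSER", "uniform"), ("2 PCS - SUITS", "uniform"), ("JUMPER/HOODIE", "uniform"),
   ("POLO T-SHIRT", "uniform"), ("TABLE CLOTH", "fnb_linen"), ("TABLE LINENS NAPKINS", "fnb_linen"),
   ("BATH ROBES", "hsk_linen"), ("GUEST-OTHER", "guest_laundry"), ("HOUSEKEEPING", "hsk_linen")]

-- CATALOGUE.get(name) (only the 'cat' field matters; every stored dict is truthy, so 'if c:' = 'is present')
def pvCatOf (name : String) : Option String :=
  (pvCatalogueCat.find? (fun p => p.1 == name)).map (fun p => p.2)

def get_order_type (items : List (String × Int)) (dept : String) : String :=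
  let d := PySem.Str.upper (PySem.Str.strip dept)
  if d == "HOTEL -GUEST" || d == "LOFT -RESIDENT" then "guest_laundry"
  else
    let cats : PySem.Set String :=
      items.foldl (fun s p =>
        match pvCatOf p.1 with
        | some c => PySem.Set.add s c
        | none => s) PySem.Set.empty
    if PySem.Set.contains cats "hsk_linen" then "hsk_linen"
    else if PySem.Set.contains cats "fnb_linen" then "fnb_linen"
    else if PySem.Set.contains cats "guest_laundry" then "guest_laundry"
    else "uniform"

-- ===== PORT B =====
def get_order_type_alt (items : List (String × Int)) (dept : String) : String :=
  let d := PySem.Str.upper (PySem.Str.strip dept)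
  if d == "HOTEL -GUEST" || d == "LOFT -RESIDENT" then "guest_laundry"
  else
    match ["hsk_linen", "fnb_linen", "guest_laundry"].find?
        (fun cat => items.any (fun p => pvCatOf p.1 == some cat)) with
    | some cat => cat
    | none => "uniform"

-- ===== PRECONDITION & SPEC =====
def Spec_get_order_type (items : List (String × Int)) (dept : String) (out : String) : Prop := out = get_order_type_alt items dept
instance (items : List (String × Int)) (dept : String) (out : String) : Decidable (Spec_get_order_type items dept out) := by unfold Spec_get_order_type; infer_instance

-- ===== CLAIM (what is proved, stated in full; the proofs are below) =====
def Claim_equal_get_order_type : Prop := ∀ (items : List (String × Int)) (dept : String), Dom_get_order_type items dept → Spec_get_order_type items dept (get_order_type items dept)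

-- ===== LEMMAS AND PROOFS =====

-- membership in A's accumulated category set = existence of an item with that category
theorem pv_contains_fold (items : List (String × Int)) (s : PySem.Set String) (x : String) :
    PySem.Set.contains
      (items.foldl (fun s p =>
        match pvCatOf p.1 with
        | some c => PySem.Set.add s c
        | none => s) s) x
      = (PySem.Set.contains s x || items.any (fun p => pvCatOf p.1 == some x)) := by
  induction items generalizing s with
  | nil => simp
  | cons hd tl ih =>
    simp only [List.foldl_cons, List.any_cons]
    cases h : pvCatOf hd.1 with
    | none =>
      simp only [h]
      rw [ih]
      simp
    | some c =>
      simp only [h, ih]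
      simp only [PySem.Set.contains_eq_listContains, PySem.Set.mem_add,
        Bool.or_assoc, List.contains_eq_mem]
      have hb : (c == x) = decide (x = c) := by
        by_cases hx : x = c
        · simp [hx]
        · have hcx : ¬ c = x := fun hcx => hx hcx.symm
          simp [hx, hcx]
      simp [hb, Bool.or_assoc]

-- ===== VERDICT (by name: the statement is the Claim_ definition above) =====
theorem get_order_type_spec : Claim_equal_get_order_type := by
  intro items dept _
  unfold Spec_get_order_type get_order_type get_order_type_alt
  by_cases hd : (PySem.Str.upper (PySem.Str.strip dept) == "HOTEL -GUEST"
      || PySem.Str.upper (PySem.Str.strip dept) == "LOFT -RESIDENT") = true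
  · simp only [hd, if_true]
  · simp only [Bool.not_eq_true] at hd
    simp only [hd, Bool.false_eq_true, if_false, List.find?]
    rw [pv_contains_fold, pv_contains_fold, pv_contains_fold]
    by_cases h1 : items.any (fun p => pvCatOf p.1 == some "hsk_linen") = true
    · simp [h1, PySem.Set.empty]
    · by_cases h2 : items.any (fun p => pvCatOf p.1 == some "fnb_linen") = true
      · simp [h1, h2, PySem.Set.empty]
      · by_cases h3 : items.any (fun p => pvCatOf p.1 == some "guest_laundry") = true
        · simp [h1, h2, h3, PySem.Set.empty]
        · simp [h1, h2, h3, PySem.Set.empty]
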